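-- pv_equiv track=rewrite | github.com/leejihoon0312/Coding_Test | 프로그래머스/Lv. 1/공원 산책.py | solution
-- ===== SOURCE A (Python) =====
-- def solution(park, routes):
--     row = len(park)
--     col = len(park[0])
--
--     # 북, 남, 서, 동
--     dr = [-1, 1, 0, 0]
--     dc = [0, 0, -1, 1]
--
--     directions = ["N", "S", "W", "E"]
--
--     start_row = 0
--     start_col = 0
--     for r in range(row):
--         for c in range(col):
--             if park[r][c] == "S":
--                 start_row = r
--                 start_col = c
--                 break
--
--     cur_row = start_row
--     cur_col = start_col
--     for route in routes:
--         direction, num = route.split()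
--         flag = True
--         direct_idx = directions.index(direction)
--
--         temp_row = cur_row
--         temp_col = cur_col
--         for loop in range(1, int(num) + 1):
--             next_row = temp_row + dr[direct_idx]
--             next_col = temp_col + dc[direct_idx]
--
--             if 0 <= next_row < row and 0 <= next_col < col and park[next_row][next_col] != "X":
--                 temp_row = next_row
--                 temp_col = next_col
--             else:
--                 flag = False
--                 break
--
--         if flag:
--             cur_row = temp_row
--             cur_col = temp_col
--
--     answer = [cur_row, cur_col]
--     return answer
-- ===== SOURCE B (Python) =====
-- def solution(park, routes):
--     rows, cols = len(park), len(park[0])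
--     # column strings: col_of[j][i] == park[i][j]
--     col_of = [''.join(line[j] for line in park) for j in range(cols)]
--     r, c = next(((i, line.find('S')) for i, line in enumerate(park) if 'S' in line),
--                 (0, 0))
--     step = {'N': (-1, 0), 'S': (1, 0), 'W': (0, -1), 'E': (0, 1)}
--     for route in routes:
--         d, num = route.split()
--         n = int(num)
--         dr, dc = step[d]
--         er, ec = r + dr * n, c + dc * n
--         if not (0 <= er < rows and 0 <= ec < cols):
--             continue
--         lane, a, b = (park[r], c, ec) if dr == 0 else (col_of[c], r, er)
--         seg = lane[b:a] if b < a else lane[a + 1:b + 1]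
--         if 'X' not in seg:
--             r, c = er, ec
--     return [r, c]
-- ===== Notes on version B (the rewrite author's own statement) =====
-- stated objective: alternative
-- what changed: B precomputes the transposed grid (column strings) and finds the start by a single generator scan with a (0,0) default, then resolves each route by endpoint arithmetic, one bounds test and one slice substring test ('X' not in the exclusive segment of the row/column string) instead of A's cell-by-cell stepping with temp position, flag and break; …
-- outside the precondition, e.g. on solution(['S', 'S'], []): A returns [1, 0], B returns [0, 0]; on solution(['.S.'], ['W -1']): A returns [0, 1], B returns [0, 2]; on solution(['a', 'bS'], []): A returns [0, 0], B returns [1, 1]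
import Mathlib
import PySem

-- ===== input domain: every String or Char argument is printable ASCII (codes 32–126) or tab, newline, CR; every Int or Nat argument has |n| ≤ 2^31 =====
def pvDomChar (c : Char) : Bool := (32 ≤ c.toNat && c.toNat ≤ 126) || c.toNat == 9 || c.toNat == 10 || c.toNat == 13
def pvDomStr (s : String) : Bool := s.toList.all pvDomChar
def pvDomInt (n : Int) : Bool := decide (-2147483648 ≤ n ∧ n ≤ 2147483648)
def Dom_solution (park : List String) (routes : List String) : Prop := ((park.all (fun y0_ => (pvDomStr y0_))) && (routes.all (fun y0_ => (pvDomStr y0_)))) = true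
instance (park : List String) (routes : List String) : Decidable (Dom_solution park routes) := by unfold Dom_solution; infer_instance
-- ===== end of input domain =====

-- B replaces A's cell-by-cell stepping (temp position, flag, break) by a transposed
-- column view, endpoint arithmetic and one slice substring test per route (objective:
-- alternative); equivalence is proved on well-formed park-walk inputs (Pre_solution).

-- ===== PORT A =====
-- park[r][c]; A evaluates it only under its own range guards, so on inputs in
-- Pre_solution the defaults are never read (exact there).
def cellA (park : List String) (r c : Int) : Char :=
  PySem.List.pyGetD (PySem.List.pyGetD park r "").toList c ' '

-- the nested start scan: the inner 'for c: … break' is a first-hit search over the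
-- row; the outer loop keeps running, so a later 'S' row overwrites the state
def scanA (park : List String) (row col : Int) : Int × Int :=
  (PySem.List.pyRange 0 row).foldl (fun st r =>
    match (PySem.List.pyRange 0 col).find? (fun c => cellA park r c == 'S') with
    | some c => (r, c)
    | none => st) (0, 0)

-- the inner 'for loop in range(1, int(num)+1)' with its break: none = flag False
def walkA (park : List String) (row col drv dcv : Int) :
    List Int → Int × Int → Option (Int × Int)
  | [], t => some t
  | _ :: rest, t =>
    let nr := t.1 + drv
    let nc := t.2 + dcv
    if 0 ≤ nr ∧ nr < row ∧ 0 ≤ nc ∧ nc < col ∧ cellA park nr nc ≠ 'X' then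
      walkA park row col drv dcv rest (nr, nc)
    else none

-- the body of A's 'for route in routes' loop; split()/index()/int() raise outside
-- Pre_solution, where the .getD defaults / fall-through arm are never reached
def stepA (park : List String) (row col : Int) (cur : Int × Int) (route : String) :
    Int × Int :=
  match PySem.Str.split₀ route with
  | [direction, num] =>
    let directions : List String := ["N", "S", "W", "E"]
    let di : Int := ((PySem.List.index? directions direction).getD 0 : Nat)
    let n : Int := (PySem.Int.ofStr? num).getD 0
    match walkA park row col (PySem.List.pyGetD [-1, 1, 0, 0] di 0)
        (PySem.List.pyGetD [0, 0, -1, 1] di 0) (PySem.List.pyRange 1 (n + 1)) cur with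
    | some t => t
    | none => cur
  | _ => cur

def solution (park : List String) (routes : List String) : List Int :=
  let row : Int := park.length
  let col : Int := (PySem.List.pyGetD park 0 "").toList.length
  let fin := routes.foldl (stepA park row col) (scanA park row col)
  [fin.1, fin.2]

-- ===== PORT B =====
-- ''.join(line[j] for line in park)   (the j-th column string, as chars)
def colChars (park : List String) (j : Int) : List Char :=
  park.map (fun line => PySem.List.pyGetD line.toList j ' ')

-- the body of B's route loop: endpoint arithmetic, one bounds test, one slice test
def stepB (park : List String) (rows cols : Int) (colOf : List (List Char))
    (cur : Int × Int) (route : String) : Int × Int :=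
  match PySem.Str.split₀ route with
  | [d, num] =>
    let n : Int := (PySem.Int.ofStr? num).getD 0
    let step : PySem.Dict String (Int × Int) :=
      PySem.Dict.ofList [("N", (-1, 0)), ("S", (1, 0)), ("W", (0, -1)), ("E", (0, 1))]
    let sd := PySem.Dict.getD step d (0, 0)
    let er := cur.1 + sd.1 * n
    let ec := cur.2 + sd.2 * n
    if 0 ≤ er ∧ er < rows ∧ 0 ≤ ec ∧ ec < cols then
      let lane := if sd.1 = 0 then (PySem.List.pyGetD park cur.1 "").toList
                  else PySem.List.pyGetD colOf cur.2 []
      let a := if sd.1 = 0 then cur.2 else cur.1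
      let b := if sd.1 = 0 then ec else er
      let seg := if b < a then PySem.List.slice lane (some b) (some a)
                 else PySem.List.slice lane (some (a + 1)) (some (b + 1))
      if PySem.Chars.isIn ['X'] seg then cur else (er, ec)
    else cur
  | _ => cur

def solution_alt (park : List String) (routes : List String) : List Int :=
  let rows : Int := park.length
  let cols : Int := (PySem.List.pyGetD park 0 "").toList.length
  let colOf := (PySem.List.pyRange 0 cols).map (colChars park)
  -- next(((i, line.find('S')) for i, line in enumerate(park) if 'S' in line), (0, 0))
  let start : Int × Int :=
    match (PySem.List.enumerate park).find? (fun p => PySem.Str.isIn "S" p.2) with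
    | some p => (p.1, PySem.Str.find p.2 "S")
    | none => (0, 0)
  let fin := routes.foldl (stepB park rows cols colOf) start
  [fin.1, fin.2]

-- ===== PRECONDITION & SPEC =====
-- route is "<dir> <count>" with dir in NSWE and count an int literal ≥ 0
def routeOK (route : String) : Bool :=
  match PySem.Str.split₀ route with
  | [d, num] => (d == "N" || d == "S" || d == "W" || d == "E")
      && decide (0 ≤ (PySem.Int.ofStr? num).getD (-1))
  | _ => false

-- Pre_ excludes inputs outside the puzzle's natural domain: parks whose first row is
-- empty or longer than another row, parks with an 'S' outside the cols-wide grid or in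
-- more than one row (A's scan order there is accidental, or it raises), and malformed or
-- negative-count routes (A raises, or its no-op on a negative count is an accident of
-- range()).
def Pre_solution (park : List String) (routes : List String) : Prop :=
  park ≠ [] ∧
  (PySem.List.pyGetD park 0 "").toList ≠ [] ∧
  (∀ s ∈ park, (PySem.List.pyGetD park 0 "").toList.length ≤ s.toList.length) ∧
  (∀ s ∈ park, 'S' ∉ s.toList.drop ((PySem.List.pyGetD park 0 "").toList.length)) ∧
  park.countP (fun s => PySem.Str.isIn "S" s) ≤ 1 ∧
  (∀ route ∈ routes, routeOK route = true)

instance (park : List String) (routes : List String) : Decidable (Pre_solution park routes) := by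
  unfold Pre_solution; infer_instance

def pvWitness_solution : List String × List String := (["SO", "OX"], ["E 1", "S 1"])

def Spec_solution (park : List String) (routes : List String) (out : List Int) : Prop :=
  out = solution_alt park routes
instance (park : List String) (routes : List String) (out : List Int) :
    Decidable (Spec_solution park routes out) := by unfold Spec_solution; infer_instance

-- ===== CLAIM (what is proved, stated in full; the proofs are below) =====
def Claim_equal_solution : Prop := ∀ (park : List String) (routes : List String),
  Dom_solution park routes → Pre_solution park routes →
  Spec_solution park routes (solution park routes)

-- ===== LEMMAS AND PROOFS =====

-- first index of 'S' in a row, via getD (j < k < length keeps it honest)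
def FirstS (cs : List Char) (k : Nat) : Prop :=
  k < cs.length ∧ cs.getD k ' ' = 'S' ∧ ∀ j < k, cs.getD j ' ' ≠ 'S'

theorem firstS_exists (cs : List Char) (h : 'S' ∈ cs) : ∃ k, FirstS cs k := by
  have hex : ∃ i, i < cs.length ∧ cs.getD i ' ' = 'S' := by
    obtain ⟨i, hi, he⟩ := List.mem_iff_getElem.mp h
    exact ⟨i, hi, by simp [List.getD_eq_getElem?_getD, List.getElem?_eq_getElem hi, he]⟩
  refine ⟨Nat.find hex, (Nat.find_spec hex).1, (Nat.find_spec hex).2, ?_⟩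
  intro j hj hS
  have hjlen : j < cs.length := lt_trans hj (Nat.find_spec hex).1
  exact absurd (Nat.find_min hex hj) (by simp [hjlen, List.getD_eq_getElem cs ' ' hjlen ▸ hS])

theorem walkA_spec (park : List String) (row col drv dcv : Int) (l : List Int)
    (t : Int × Int) :
    walkA park row col drv dcv l t =
      if ∀ k : Nat, k < l.length →
          (0 ≤ t.1 + drv * (k + 1) ∧ t.1 + drv * (k + 1) < row ∧
           0 ≤ t.2 + dcv * (k + 1) ∧ t.2 + dcv * (k + 1) < col ∧
           cellA park (t.1 + drv * (k + 1)) (t.2 + dcv * (k + 1)) ≠ 'X')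
      then some (t.1 + drv * l.length, t.2 + dcv * l.length)
      else none := by
  induction l generalizing t with
  | nil =>
    rw [if_pos (by intro k hk; exact absurd hk (Nat.not_lt_zero k))]
    simp [walkA]
  | cons a rest ih =>
    simp only [walkA]
    by_cases hC : 0 ≤ t.1 + drv ∧ t.1 + drv < row ∧ 0 ≤ t.2 + dcv ∧ t.2 + dcv < col ∧
        cellA park (t.1 + drv) (t.2 + dcv) ≠ 'X'
    · rw [if_pos hC, ih]
      have hiff : (∀ k : Nat, k < rest.length →
          (0 ≤ t.1 + drv + drv * (k + 1) ∧ t.1 + drv + drv * (k + 1) < row ∧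
           0 ≤ t.2 + dcv + dcv * (k + 1) ∧ t.2 + dcv + dcv * (k + 1) < col ∧
           cellA park (t.1 + drv + drv * (k + 1)) (t.2 + dcv + dcv * (k + 1)) ≠ 'X')) ↔
          (∀ k : Nat, k < (a :: rest).length →
          (0 ≤ t.1 + drv * (k + 1) ∧ t.1 + drv * (k + 1) < row ∧
           0 ≤ t.2 + dcv * (k + 1) ∧ t.2 + dcv * (k + 1) < col ∧
           cellA park (t.1 + drv * (k + 1)) (t.2 + dcv * (k + 1)) ≠ 'X')) := by
        constructor
        · intro hall k hk
          match k with
          | 0 => simpa using hC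
          | (j + 1) =>
            have e1 : t.1 + drv * ((j:Nat) + 1 + 1) = t.1 + drv + drv * ((j:Nat) + 1) := by
              ring
            have e2 : t.2 + dcv * ((j:Nat) + 1 + 1) = t.2 + dcv + dcv * ((j:Nat) + 1) := by
              ring
            have := hall j (by simpa using hk)
            push_cast
            rw [e1, e2]; exact this
        · intro hall k hk
          have e1 : t.1 + drv + drv * ((k:Nat) + 1) = t.1 + drv * ((k:Nat) + 1 + 1) := by
            ring
          have e2 : t.2 + dcv + dcv * ((k:Nat) + 1) = t.2 + dcv * ((k:Nat) + 1 + 1) := by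
            ring
          have := hall (k + 1) (by simpa using Nat.succ_lt_succ hk)
          push_cast at this
          rw [← e1, ← e2] at this; exact this
      rw [if_congr hiff rfl rfl]
      have e3 : t.1 + drv + drv * (rest.length : Int) = t.1 + drv * ((a :: rest).length : Int) := by
        simp only [List.length_cons]; push_cast; ring
      have e4 : t.2 + dcv + dcv * (rest.length : Int) = t.2 + dcv * ((a :: rest).length : Int) := by
        simp only [List.length_cons]; push_cast; ring
      rw [e3, e4]
    · rw [if_neg hC, if_neg]
      intro hall
      exact hC (by simpa using hall 0 (by simp))

-- membership of 'X' in an inclusive slice, as an indexed statement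
theorem isIn_slice_iff (l : List Char) (lo hi : Int) (hlo : 0 ≤ lo) (hhi : 0 ≤ hi) :
    PySem.Chars.isIn ['X'] (PySem.List.slice l (some lo) (some hi)) = true ↔
      ∃ j : Nat, lo ≤ (j : Int) ∧ (j : Int) < hi ∧ j < l.length ∧ l.getD j ' ' = 'X' := by
  rw [PySem.Chars.isIn_iff_infix, List.singleton_infix_iff,
      PySem.List.slice_toNat l hlo hhi]
  constructor
  · intro hm
    obtain ⟨i, hilt, hie⟩ := List.mem_iff_getElem.mp hm
    have hlen := hilt
    simp only [List.length_take, List.length_drop, lt_min_iff] at hlen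
    refine ⟨lo.toNat + i, by omega, by omega, by omega, ?_⟩
    rw [List.getD_eq_getElem l ' ' (by omega)]
    simpa [List.getElem_take, List.getElem_drop] using hie
  · rintro ⟨j, hj1, hj2, hj3, hj4⟩
    refine List.mem_iff_getElem.mpr ⟨j - lo.toNat, ?_, ?_⟩
    · simp only [List.length_take, List.length_drop, lt_min_iff]; omega
    · rw [List.getD_eq_getElem l ' ' hj3] at hj4
      have he : lo.toNat + (j - lo.toNat) = j := by omega
      simp [List.getElem_take, List.getElem_drop, he, hj4]

-- the shared lane argument: A's step-by-step condition along a 1-D lane equals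
-- B's endpoint-bounds + obstacle-free-segment condition (segment excludes the
-- current cell, slice direction given by the sign of the move)
theorem lane_equiv (l : List Char) (L : Int) (hL : L ≤ (l.length : Int))
    (g : Int → Char) (hg : ∀ t : Int, 0 ≤ t → t < L → l.getD t.toNat ' ' = g t)
    (t0 n s : Int) (hs : s = 1 ∨ s = -1) (hn : 0 ≤ n)
    (h0 : 0 ≤ t0) (h1 : t0 < L) :
    ((∀ k : Nat, k < n.toNat →
        (0 ≤ t0 + s * (k + 1) ∧ t0 + s * (k + 1) < L ∧ g (t0 + s * (k + 1)) ≠ 'X')) ↔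
      (0 ≤ t0 + s * n ∧ t0 + s * n < L ∧
        PySem.Chars.isIn ['X']
          (if t0 + s * n < t0 then PySem.List.slice l (some (t0 + s * n)) (some t0)
           else PySem.List.slice l (some (t0 + 1)) (some (t0 + s * n + 1))) = false)) := by
  constructor
  · intro hall
    have hbnd : 0 ≤ t0 + s * n ∧ t0 + s * n < L := by
      by_cases hn0 : n = 0
      · subst hn0
        have hz : t0 + s * 0 = t0 := by ring
        rw [hz]; exact ⟨h0, h1⟩
      · have hk := hall (n.toNat - 1) (by omega)
        have hc : ((n.toNat - 1 : Nat) : Int) + 1 = n := by omega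
        rw [hc] at hk
        exact ⟨hk.1, hk.2.1⟩
    refine ⟨hbnd.1, hbnd.2, ?_⟩
    by_contra htrue
    rw [Bool.not_eq_false] at htrue
    split_ifs at htrue with hlt
    · obtain ⟨j, hj1, hj2, hj3, hj4⟩ := (isIn_slice_iff l _ _ hbnd.1 h0).mp htrue
      have hgX : g (j : Int) = 'X' := by
        rw [← hg (j : Int) (by exact_mod_cast Nat.zero_le j) (by omega)]
        simpa using hj4
      set k := (s * ((j : Int) - t0) - 1).toNat with hkdef
      have hklt : k < n.toNat := by rcases hs with rfl | rfl <;> omega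
      have harg : t0 + s * ((k : Int) + 1) = (j : Int) := by
        rcases hs with rfl | rfl <;> omega
      have hne := (hall k hklt).2.2
      rw [harg] at hne
      exact hne hgX
    · obtain ⟨j, hj1, hj2, hj3, hj4⟩ := (isIn_slice_iff l _ _ (by omega) (by omega)).mp htrue
      have hgX : g (j : Int) = 'X' := by
        rw [← hg (j : Int) (by exact_mod_cast Nat.zero_le j) (by omega)]
        simpa using hj4
      set k := (s * ((j : Int) - t0) - 1).toNat with hkdef
      have hklt : k < n.toNat := by rcases hs with rfl | rfl <;> omega
      have harg : t0 + s * ((k : Int) + 1) = (j : Int) := by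
        rcases hs with rfl | rfl <;> omega
      have hne := (hall k hklt).2.2
      rw [harg] at hne
      exact hne hgX
  · rintro ⟨he0, heL, hfree⟩ k hk
    have hp0 : 0 ≤ t0 + s * ((k : Int) + 1) := by rcases hs with rfl | rfl <;> omega
    have hpL : t0 + s * ((k : Int) + 1) < L := by rcases hs with rfl | rfl <;> omega
    refine ⟨hp0, hpL, ?_⟩
    intro hXp
    have hj3 : (t0 + s * ((k : Int) + 1)).toNat < l.length := by
      rcases hs with rfl | rfl <;> omega
    have hj4 : l.getD (t0 + s * ((k : Int) + 1)).toNat ' ' = 'X' := by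
      rw [hg _ hp0 hpL]; exact hXp
    split_ifs at hfree with hlt
    · have htrue := (isIn_slice_iff l (t0 + s * n) t0 he0 h0).mpr
        ⟨(t0 + s * ((k : Int) + 1)).toNat, by rcases hs with rfl | rfl <;> omega,
          by rcases hs with rfl | rfl <;> omega, hj3, hj4⟩
      rw [hfree] at htrue
      simp at htrue
    · have htrue := (isIn_slice_iff l (t0 + 1) (t0 + s * n + 1) (by omega) (by omega)).mpr
        ⟨(t0 + s * ((k : Int) + 1)).toNat, by rcases hs with rfl | rfl <;> omega,
          by rcases hs with rfl | rfl <;> omega, hj3, hj4⟩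
      rw [hfree] at htrue
      simp at htrue

theorem countP_one_decomp {α : Type} (p : α → Bool) (l : List α) (h : l.countP p = 1) :
    ∃ pre x suf, l = pre ++ x :: suf ∧ p x = true ∧
      (∀ y ∈ pre, p y = false) ∧ (∀ y ∈ suf, p y = false) := by
  induction l with
  | nil => simp at h
  | cons a t ih =>
    by_cases hp : p a = true
    · refine ⟨[], a, t, by simp, hp, by simp, ?_⟩
      have h0 : t.countP p = 0 := by
        have := List.countP_cons_of_pos (l := t) hp; omega
      intro y hy
      simpa using List.countP_eq_zero.mp h0 y hy
    · have hpf : p a = false := by simpa using hp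
      have ht : t.countP p = 1 := by
        rwa [List.countP_cons_of_neg (p := p) hp] at h
      obtain ⟨pre, x, suf, rfl, hx, hpre, hsuf⟩ := ih ht
      refine ⟨a :: pre, x, suf, rfl, hx, ?_, hsuf⟩
      intro y hy
      rcases List.mem_cons.mp hy with rfl | hy
      · exact hpf
      · exact hpre y hy

def InvP (park : List String) (p : Int × Int) : Prop :=
  0 ≤ p.1 ∧ p.1 < (park.length : Int) ∧ 0 ≤ p.2 ∧
  p.2 < (((PySem.List.pyGetD park 0 "").toList.length : Nat) : Int)

theorem colChars_getD (park : List String) (c : Int) (t : Int)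
    (ht0 : 0 ≤ t) (htL : t < (park.length : Int)) :
    (colChars park c).getD t.toNat ' ' = cellA park t c := by
  have htn : t.toNat < park.length := by omega
  rw [colChars, List.getD_eq_getElem _ ' ' (by simpa using htn), List.getElem_map]
  rw [cellA, PySem.List.pyGetD_eq_getElem park "" ht0 (by omega)]

theorem rowlane_getD (park : List String) (r : Int) (t : Int) (ht0 : 0 ≤ t) :
    (PySem.List.pyGetD park r "").toList.getD t.toNat ' ' = cellA park r t := by
  rw [cellA]
  rw [show t = ((t.toNat : Nat) : Int) from (Int.toNat_of_nonneg ht0).symm]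
  rw [PySem.List.pyGetD_natCast]
  have hmt : (max t 0).toNat = t.toNat := by omega
  simp [List.getD_eq_getElem?_getD, hmt]

theorem stepV (park : List String) (cur : Int × Int) (hInv : InvP park cur)
    (s n : Int) (hs : s = 1 ∨ s = -1) (hn : 0 ≤ n) :
    (match walkA park park.length ((PySem.List.pyGetD park 0 "").toList.length) s 0
        (PySem.List.pyRange 1 (n + 1)) cur with
      | some t => t
      | none => cur) =
      (if 0 ≤ cur.1 + s * n ∧ cur.1 + s * n < (park.length : Int) ∧
          0 ≤ cur.2 + 0 * n ∧
          cur.2 + 0 * n < (((PySem.List.pyGetD park 0 "").toList.length : Nat) : Int) then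
        if PySem.Chars.isIn ['X']
            (if cur.1 + s * n < cur.1 then
              PySem.List.slice (PySem.List.pyGetD
                ((PySem.List.pyRange 0 ((PySem.List.pyGetD park 0 "").toList.length)).map
                  (colChars park)) cur.2 []) (some (cur.1 + s * n)) (some cur.1)
            else
              PySem.List.slice (PySem.List.pyGetD
                ((PySem.List.pyRange 0 ((PySem.List.pyGetD park 0 "").toList.length)).map
                  (colChars park)) cur.2 []) (some (cur.1 + 1)) (some (cur.1 + s * n + 1)))
          then cur
        else (cur.1 + s * n, cur.2 + 0 * n)
      else cur) := by
  obtain ⟨h1, h2, h3, h4⟩ := hInv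
  rw [walkA_spec]
  have hlenNat : (PySem.List.pyRange 1 (n + 1)).length = n.toNat := by
    rw [PySem.List.length_pyRange_one]; omega
  have hcol : PySem.List.pyGetD
      ((PySem.List.pyRange 0 ((PySem.List.pyGetD park 0 "").toList.length)).map
        (colChars park)) cur.2 [] = colChars park cur.2 :=
    PySem.List.pyGetD_map_pyRange_of_nonneg _ _ _ _ h3 h4
  have hLcol : (park.length : Int) ≤ ((colChars park cur.2).length : Int) := by
    simp [colChars]
  have hmain := lane_equiv (colChars park cur.2) (park.length : Int) hLcol
      (fun t => cellA park t cur.2) (fun t a b => colChars_getD park cur.2 t a b)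
      cur.1 n s hs hn h1 h2
  have hcnd : (∀ k : Nat, k < (PySem.List.pyRange 1 (n + 1)).length →
      (0 ≤ cur.1 + s * (k + 1) ∧ cur.1 + s * (k + 1) < (park.length : Int) ∧
       0 ≤ cur.2 + 0 * (k + 1) ∧
       cur.2 + 0 * (k + 1) < (((PySem.List.pyGetD park 0 "").toList.length : Nat) : Int) ∧
       cellA park (cur.1 + s * (k + 1)) (cur.2 + 0 * (k + 1)) ≠ 'X')) ↔
      (∀ k : Nat, k < n.toNat →
        (0 ≤ cur.1 + s * (k + 1) ∧ cur.1 + s * (k + 1) < (park.length : Int) ∧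
         (fun t => cellA park t cur.2) (cur.1 + s * (k + 1)) ≠ 'X')) := by
    rw [hlenNat]
    refine forall_congr' (fun k => imp_congr_right (fun hk => ?_))
    constructor
    · rintro ⟨a, b, -, -, e⟩
      rw [zero_mul, add_zero] at e
      exact ⟨a, b, e⟩
    · rintro ⟨a, b, e⟩
      refine ⟨a, b, ?_, ?_, ?_⟩ <;> rw [zero_mul, add_zero]
      · exact h3
      · exact h4
      · exact e
  rw [hcol]
  by_cases hA : ∀ k : Nat, k < n.toNat →
      (0 ≤ cur.1 + s * (k + 1) ∧ cur.1 + s * (k + 1) < (park.length : Int) ∧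
       (fun t => cellA park t cur.2) (cur.1 + s * (k + 1)) ≠ 'X')
  · rw [if_pos (hcnd.mpr hA)]
    obtain ⟨hb1, hb2, hfree⟩ := hmain.mp hA
    rw [if_pos ⟨hb1, hb2, by rw [zero_mul, add_zero]; exact h3, by rw [zero_mul, add_zero]; exact h4⟩]
    rw [if_neg (by rw [hfree]; exact Bool.false_ne_true)]
    simp only [hlenNat]
    have : ((n.toNat : Nat) : Int) = n := by omega
    rw [this]
  · rw [if_neg (fun hcc => hA (hcnd.mp hcc))]
    by_cases hb : 0 ≤ cur.1 + s * n ∧ cur.1 + s * n < (park.length : Int) ∧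
        0 ≤ cur.2 + 0 * n ∧
        cur.2 + 0 * n < (((PySem.List.pyGetD park 0 "").toList.length : Nat) : Int)
    · rw [if_pos hb]
      by_cases hin : PySem.Chars.isIn ['X']
          (if cur.1 + s * n < cur.1 then
            PySem.List.slice (colChars park cur.2) (some (cur.1 + s * n)) (some cur.1)
          else
            PySem.List.slice (colChars park cur.2) (some (cur.1 + 1))
              (some (cur.1 + s * n + 1))) = true
      · rw [if_pos hin]
      · exact absurd (hmain.mpr ⟨hb.1, hb.2.1, by simpa using hin⟩) hA
    · rw [if_neg hb]

theorem stepH (park : List String)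
    (hwide : ∀ t ∈ park, (PySem.List.pyGetD park 0 "").toList.length ≤ t.toList.length)
    (cur : Int × Int) (hInv : InvP park cur)
    (s n : Int) (hs : s = 1 ∨ s = -1) (hn : 0 ≤ n) :
    (match walkA park park.length ((PySem.List.pyGetD park 0 "").toList.length) 0 s
        (PySem.List.pyRange 1 (n + 1)) cur with
      | some t => t
      | none => cur) =
      (if 0 ≤ cur.1 + 0 * n ∧ cur.1 + 0 * n < (park.length : Int) ∧
          0 ≤ cur.2 + s * n ∧
          cur.2 + s * n < (((PySem.List.pyGetD park 0 "").toList.length : Nat) : Int) then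
        if PySem.Chars.isIn ['X']
            (if cur.2 + s * n < cur.2 then
              PySem.List.slice (PySem.List.pyGetD park cur.1 "").toList
                (some (cur.2 + s * n)) (some cur.2)
            else
              PySem.List.slice (PySem.List.pyGetD park cur.1 "").toList
                (some (cur.2 + 1)) (some (cur.2 + s * n + 1)))
          then cur
        else (cur.1 + 0 * n, cur.2 + s * n)
      else cur) := by
  obtain ⟨h1, h2, h3, h4⟩ := hInv
  rw [walkA_spec]
  have hlenNat : (PySem.List.pyRange 1 (n + 1)).length = n.toNat := by
    rw [PySem.List.length_pyRange_one]; omega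
  have hLrow : (((PySem.List.pyGetD park 0 "").toList.length : Nat) : Int) ≤
      (((PySem.List.pyGetD park cur.1 "").toList.length : Nat) : Int) := by
    have hmem : PySem.List.pyGetD park cur.1 "" ∈ park :=
      PySem.List.pyGetD_mem park "" (by unfold PySem.Raise.InRange; omega)
    exact_mod_cast hwide _ hmem
  have hmain := lane_equiv (PySem.List.pyGetD park cur.1 "").toList
      (((PySem.List.pyGetD park 0 "").toList.length : Nat) : Int) hLrow
      (fun t => cellA park cur.1 t) (fun t a _ => rowlane_getD park cur.1 t a)
      cur.2 n s hs hn h3 h4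
  have hcnd : (∀ k : Nat, k < (PySem.List.pyRange 1 (n + 1)).length →
      (0 ≤ cur.1 + 0 * (k + 1) ∧ cur.1 + 0 * (k + 1) < (park.length : Int) ∧
       0 ≤ cur.2 + s * (k + 1) ∧
       cur.2 + s * (k + 1) < (((PySem.List.pyGetD park 0 "").toList.length : Nat) : Int) ∧
       cellA park (cur.1 + 0 * (k + 1)) (cur.2 + s * (k + 1)) ≠ 'X')) ↔
      (∀ k : Nat, k < n.toNat →
        (0 ≤ cur.2 + s * (k + 1) ∧
         cur.2 + s * (k + 1) < (((PySem.List.pyGetD park 0 "").toList.length : Nat) : Int) ∧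
         (fun t => cellA park cur.1 t) (cur.2 + s * (k + 1)) ≠ 'X')) := by
    rw [hlenNat]
    refine forall_congr' (fun k => imp_congr_right (fun hk => ?_))
    constructor
    · rintro ⟨-, -, a, b, e⟩
      rw [zero_mul, add_zero] at e
      exact ⟨a, b, e⟩
    · rintro ⟨a, b, e⟩
      refine ⟨?_, ?_, a, b, ?_⟩ <;> rw [zero_mul, add_zero]
      · exact h1
      · exact h2
      · exact e
  by_cases hA : ∀ k : Nat, k < n.toNat →
      (0 ≤ cur.2 + s * (k + 1) ∧
       cur.2 + s * (k + 1) < (((PySem.List.pyGetD park 0 "").toList.length : Nat) : Int) ∧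
       (fun t => cellA park cur.1 t) (cur.2 + s * (k + 1)) ≠ 'X')
  · rw [if_pos (hcnd.mpr hA)]
    obtain ⟨hb1, hb2, hfree⟩ := hmain.mp hA
    rw [if_pos ⟨by rw [zero_mul, add_zero]; exact h1, by rw [zero_mul, add_zero]; exact h2, hb1, hb2⟩]
    rw [if_neg (by rw [hfree]; exact Bool.false_ne_true)]
    simp only [hlenNat]
    have : ((n.toNat : Nat) : Int) = n := by omega
    rw [this]
  · rw [if_neg (fun hcc => hA (hcnd.mp hcc))]
    by_cases hb : 0 ≤ cur.1 + 0 * n ∧ cur.1 + 0 * n < (park.length : Int) ∧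
        0 ≤ cur.2 + s * n ∧
        cur.2 + s * n < (((PySem.List.pyGetD park 0 "").toList.length : Nat) : Int)
    · rw [if_pos hb]
      by_cases hin : PySem.Chars.isIn ['X']
          (if cur.2 + s * n < cur.2 then
            PySem.List.slice (PySem.List.pyGetD park cur.1 "").toList
              (some (cur.2 + s * n)) (some cur.2)
          else
            PySem.List.slice (PySem.List.pyGetD park cur.1 "").toList
              (some (cur.2 + 1)) (some (cur.2 + s * n + 1))) = true
      · rw [if_pos hin]
      · exact absurd (hmain.mpr ⟨hb.2.2.1, hb.2.2.2, by simpa using hin⟩) hA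
    · rw [if_neg hb]

theorem step_eq (park : List String)
    (hwide : ∀ t ∈ park, (PySem.List.pyGetD park 0 "").toList.length ≤ t.toList.length)
    (cur : Int × Int) (hInv : InvP park cur) (route : String)
    (hroute : routeOK route = true) :
    stepA park park.length ((PySem.List.pyGetD park 0 "").toList.length) cur route =
      stepB park park.length ((PySem.List.pyGetD park 0 "").toList.length)
        ((PySem.List.pyRange 0 ((PySem.List.pyGetD park 0 "").toList.length)).map
          (colChars park)) cur route := by
  unfold routeOK at hroute
  rcases hsp : PySem.Str.split₀ route with - | ⟨d, - | ⟨num, - | ⟨z, tl⟩⟩⟩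
  · rw [hsp] at hroute; simp at hroute
  · rw [hsp] at hroute; simp at hroute
  case cons.cons.cons => rw [hsp] at hroute; simp at hroute
  rw [hsp] at hroute
  simp only [Bool.and_eq_true, Bool.or_eq_true, beq_iff_eq, decide_eq_true_eq] at hroute
  obtain ⟨hd, hnum⟩ := hroute
  obtain ⟨n, hofs, hn⟩ : ∃ n, PySem.Int.ofStr? num = some n ∧ 0 ≤ n := by
    cases hoo : PySem.Int.ofStr? num with
    | none => rw [hoo] at hnum; norm_num at hnum
    | some m => exact ⟨m, rfl, by rw [hoo] at hnum; simpa using hnum⟩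
  unfold stepA stepB
  rw [hsp]
  simp only [hofs, Option.getD_some]
  rcases hd with ((rfl | rfl) | rfl) | rfl
  · rw [show (((PySem.List.index? ["N", "S", "W", "E"] "N").getD 0 : Nat) : Int) = 0 from rfl]
    rw [show PySem.List.pyGetD [(-1 : Int), 1, 0, 0] 0 0 = -1 from rfl]
    rw [show PySem.List.pyGetD [(0 : Int), 0, -1, 1] 0 0 = 0 from rfl]
    rw [show PySem.Dict.getD (PySem.Dict.ofList
      [("N", ((-1 : Int), (0 : Int))), ("S", (1, 0)), ("W", (0, -1)), ("E", (0, 1))]) "N" (0, 0)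
      = (-1, 0) from rfl]
    simp only []
    rw [if_neg (show ¬ ((-1 : Int) = 0) from by norm_num)]
    exact stepV park cur hInv (-1) n (Or.inr rfl) hn
  · rw [show (((PySem.List.index? ["N", "S", "W", "E"] "S").getD 0 : Nat) : Int) = 1 from rfl]
    rw [show PySem.List.pyGetD [(-1 : Int), 1, 0, 0] 1 0 = 1 from rfl]
    rw [show PySem.List.pyGetD [(0 : Int), 0, -1, 1] 1 0 = 0 from rfl]
    rw [show PySem.Dict.getD (PySem.Dict.ofList
      [("N", ((-1 : Int), (0 : Int))), ("S", (1, 0)), ("W", (0, -1)), ("E", (0, 1))]) "S" (0, 0)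
      = (1, 0) from rfl]
    simp only []
    rw [if_neg (show ¬ ((1 : Int) = 0) from by norm_num)]
    exact stepV park cur hInv 1 n (Or.inl rfl) hn
  · rw [show (((PySem.List.index? ["N", "S", "W", "E"] "W").getD 0 : Nat) : Int) = 2 from rfl]
    rw [show PySem.List.pyGetD [(-1 : Int), 1, 0, 0] 2 0 = 0 from rfl]
    rw [show PySem.List.pyGetD [(0 : Int), 0, -1, 1] 2 0 = -1 from rfl]
    rw [show PySem.Dict.getD (PySem.Dict.ofList
      [("N", ((-1 : Int), (0 : Int))), ("S", (1, 0)), ("W", (0, -1)), ("E", (0, 1))]) "W" (0, 0)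
      = (0, -1) from rfl]
    simp only []
    simp only [if_true]
    exact stepH park hwide cur hInv (-1) n (Or.inr rfl) hn
  · rw [show (((PySem.List.index? ["N", "S", "W", "E"] "E").getD 0 : Nat) : Int) = 3 from rfl]
    rw [show PySem.List.pyGetD [(-1 : Int), 1, 0, 0] 3 0 = 0 from rfl]
    rw [show PySem.List.pyGetD [(0 : Int), 0, -1, 1] 3 0 = 1 from rfl]
    rw [show PySem.Dict.getD (PySem.Dict.ofList
      [("N", ((-1 : Int), (0 : Int))), ("S", (1, 0)), ("W", (0, -1)), ("E", (0, 1))]) "E" (0, 0)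
      = (0, 1) from rfl]
    simp only []
    simp only [if_true]
    exact stepH park hwide cur hInv 1 n (Or.inl rfl) hn

theorem stepA_inv (park : List String) (cur : Int × Int) (hInv : InvP park cur)
    (route : String) :
    InvP park (stepA park park.length ((PySem.List.pyGetD park 0 "").toList.length) cur route) := by
  unfold stepA
  rcases PySem.Str.split₀ route with - | ⟨d, - | ⟨num, - | ⟨z, tl⟩⟩⟩
  · exact hInv
  · exact hInv
  case cons.cons.cons => exact hInv
  simp only []
  rw [walkA_spec]
  by_cases hC : ∀ k : Nat, k < (PySem.List.pyRange 1 ((PySem.Int.ofStr? num).getD 0 + 1)).length →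
      (0 ≤ cur.1 + PySem.List.pyGetD [-1, 1, 0, 0]
          (((PySem.List.index? ["N", "S", "W", "E"] d).getD 0 : Nat) : Int) 0 * (k + 1) ∧
       cur.1 + PySem.List.pyGetD [-1, 1, 0, 0]
          (((PySem.List.index? ["N", "S", "W", "E"] d).getD 0 : Nat) : Int) 0 * (k + 1) < (park.length : Int) ∧
       0 ≤ cur.2 + PySem.List.pyGetD [0, 0, -1, 1]
          (((PySem.List.index? ["N", "S", "W", "E"] d).getD 0 : Nat) : Int) 0 * (k + 1) ∧
       cur.2 + PySem.List.pyGetD [0, 0, -1, 1]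
          (((PySem.List.index? ["N", "S", "W", "E"] d).getD 0 : Nat) : Int) 0 * (k + 1) <
         (((PySem.List.pyGetD park 0 "").toList.length : Nat) : Int) ∧
       cellA park
         (cur.1 + PySem.List.pyGetD [-1, 1, 0, 0]
            (((PySem.List.index? ["N", "S", "W", "E"] d).getD 0 : Nat) : Int) 0 * (k + 1))
         (cur.2 + PySem.List.pyGetD [0, 0, -1, 1]
            (((PySem.List.index? ["N", "S", "W", "E"] d).getD 0 : Nat) : Int) 0 * (k + 1)) ≠ 'X')
  · rw [if_pos hC]
    cases hnn : (PySem.List.pyRange 1 ((PySem.Int.ofStr? num).getD 0 + 1)).length with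
    | zero =>
      simp only [Nat.cast_zero, mul_zero, add_zero]
      exact hInv
    | succ m =>
      have hk := hC m (by rw [hnn]; omega)
      have hc : ((m : Nat) : Int) + 1 = ((m + 1 : Nat) : Int) := by push_cast; ring
      rw [hc] at hk
      exact ⟨hk.1, hk.2.1, hk.2.2.1, hk.2.2.2.1⟩
  · rw [if_neg hC]
    exact hInv

theorem fold_eq (park : List String)
    (hwide : ∀ t ∈ park, (PySem.List.pyGetD park 0 "").toList.length ≤ t.toList.length)
    (rs : List String) (hall : ∀ r ∈ rs, routeOK r = true) :
    ∀ cur : Int × Int, InvP park cur →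
      rs.foldl (stepA park park.length ((PySem.List.pyGetD park 0 "").toList.length)) cur =
        rs.foldl (stepB park park.length ((PySem.List.pyGetD park 0 "").toList.length)
          ((PySem.List.pyRange 0 ((PySem.List.pyGetD park 0 "").toList.length)).map
            (colChars park))) cur := by
  induction rs with
  | nil => intro cur _; rfl
  | cons r t ih =>
    intro cur hInv
    rw [List.foldl_cons, List.foldl_cons]
    rw [← step_eq park hwide cur hInv r (hall r (by simp))]
    exact ih (fun x hx => hall x (by simp [hx])) _ (stepA_inv park cur hInv r)

theorem noS_of_isIn_false (y : String) (h : PySem.Str.isIn "S" y = false) :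
    'S' ∉ y.toList := by
  intro hmem
  have : PySem.Str.isIn "S" y = true := by
    rw [PySem.Str.isIn_iff_infix]
    rw [show ("S" : String).toList = ['S'] from by decide]
    exact (List.singleton_infix_iff _ _).mpr hmem
  rw [h] at this; simp at this

theorem chars_find_firstS (cs : List Char) (c : Nat) (hF : FirstS cs c) :
    PySem.Chars.find cs ['S'] = (c : Int) := by
  have hmemS : 'S' ∈ cs := by
    have h := hF.2.1
    rw [List.getD_eq_getElem cs ' ' hF.1] at h
    exact h ▸ List.getElem_mem _
  have h0 : 0 ≤ PySem.Chars.find cs ['S'] :=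
    (PySem.Chars.find_nonneg_iff cs ['S']).mpr ((List.singleton_infix_iff _ _).mpr hmemS)
  obtain ⟨hpref, hmin⟩ := PySem.Chars.find_spec h0
  set f := (PySem.Chars.find cs ['S']).toNat with hf
  obtain ⟨t, ht⟩ := hpref
  have hflen : f < cs.length := by
    have := congrArg List.length ht; simp at this; omega
  have hfS : cs[f] = 'S' := by
    have hd := List.drop_eq_getElem_cons hflen
    rw [hd] at ht
    simp only [List.singleton_append] at ht
    exact ((List.cons_eq_cons.mp ht).1).symm
  rcases lt_trichotomy f c with h | h | h
  · have := hF.2.2 f h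
    rw [List.getD_eq_getElem cs ' ' hflen] at this
    exact absurd hfS this
  · rw [← Int.toNat_of_nonneg h0, ← hf, h]
  · have hc : c < cs.length := hF.1
    have hcS : cs[c] = 'S' := by
      rw [← List.getD_eq_getElem cs ' ' hc]; exact hF.2.1
    have hp : ['S'] <+: cs.drop c := by
      rw [List.drop_eq_getElem_cons hc, hcS]
      exact ⟨cs.drop (c + 1), rfl⟩
    exact absurd hp (hmin c h)

theorem find?_enumerate (pre : List String) (srow : String) (suf : List String) (s : Int)
    (hpre : ∀ y ∈ pre, PySem.Str.isIn "S" y = false)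
    (hx : PySem.Str.isIn "S" srow = true) :
    (PySem.List.enumerate (pre ++ srow :: suf) s).find?
      (fun p => PySem.Str.isIn "S" p.2) = some (s + pre.length, srow) := by
  induction pre generalizing s with
  | nil =>
    rw [List.nil_append, PySem.List.enumerate_cons, List.find?_cons_of_pos (by simpa using hx)]
    simp
  | cons y t ih =>
    rw [List.cons_append, PySem.List.enumerate_cons,
      List.find?_cons_of_neg (by simpa using hpre y (by simp)),
      ih (s + 1) (fun z hz => hpre z (by simp [hz]))]
    congr 1
    simp only [List.length_cons]
    push_cast
    ring_nf

theorem inner_none (park : List String) (r : Int) (_hr0 : 0 ≤ r)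
    (hno : 'S' ∉ (PySem.List.pyGetD park r "").toList) :
    (PySem.List.pyRange 0 ((PySem.List.pyGetD park 0 "").toList.length)).find?
      (fun c => cellA park r c == 'S') = none := by
  apply List.find?_eq_none.mpr
  intro x hx
  obtain ⟨hx0, hxW⟩ := PySem.List.mem_pyRange_one.mp hx
  simp only [beq_iff_eq]
  intro hS
  have he : cellA park r x = (PySem.List.pyGetD park r "").toList.getD x.toNat ' ' :=
    (rowlane_getD park r x hx0).symm
  rw [he] at hS
  by_cases hxl : x.toNat < (PySem.List.pyGetD park r "").toList.length
  · rw [List.getD_eq_getElem _ _ hxl] at hS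
    exact hno (hS ▸ List.getElem_mem _)
  · rw [List.getD_eq_default _ _ (by omega)] at hS
    exact absurd hS (by decide)

theorem inner_some (park : List String) (r : Int) (_hr0 : 0 ≤ r) (c : Nat)
    (hcW : (c : Int) < (((PySem.List.pyGetD park 0 "").toList.length : Nat) : Int))
    (hF : FirstS (PySem.List.pyGetD park r "").toList c) :
    (PySem.List.pyRange 0 ((PySem.List.pyGetD park 0 "").toList.length)).find?
      (fun cc => cellA park r cc == 'S') = some (c : Int) := by
  apply List.find?_eq_some_iff_append.mpr
  refine ⟨?_, PySem.List.pyRange 0 (c : Int),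
    PySem.List.pyRange ((c : Int) + 1) ((PySem.List.pyGetD park 0 "").toList.length), ?_, ?_⟩
  · simp only [beq_iff_eq]
    rw [← rowlane_getD park r (c : Int) (by exact_mod_cast Nat.zero_le c)]
    simpa using hF.2.1
  · rw [PySem.List.pyRange_one_append 0 (c : Int) _ (by exact_mod_cast Nat.zero_le c)
      (le_of_lt hcW), PySem.List.pyRange_one_cons hcW]
  · intro a ha
    obtain ⟨ha0, hac⟩ := PySem.List.mem_pyRange_one.mp ha
    have hlt : a.toNat < c := by omega
    have hne := hF.2.2 a.toNat hlt
    rw [rowlane_getD park r a ha0] at hne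
    simpa using hne

theorem scanA_eq (pre : List String) (srow : String) (suf : List String)
    (hpre : ∀ y ∈ pre, PySem.Str.isIn "S" y = false)
    (hsuf : ∀ y ∈ suf, PySem.Str.isIn "S" y = false)
    (c : Nat) (hF : FirstS srow.toList c)
    (hcW : (c : Int) <
      (((PySem.List.pyGetD (pre ++ srow :: suf) 0 "").toList.length : Nat) : Int)) :
    scanA (pre ++ srow :: suf) ((pre ++ srow :: suf).length)
      ((PySem.List.pyGetD (pre ++ srow :: suf) 0 "").toList.length) =
      ((pre.length : Int), (c : Int)) := by
  unfold scanA
  have hgetk : PySem.List.pyGetD (pre ++ srow :: suf) (pre.length : Int) "" = srow := by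
    rw [PySem.List.pyGetD_eq_getElem _ "" (by exact_mod_cast Nat.zero_le _) (by simp)]
    simp
  rw [PySem.List.pyRange_one_append 0 (pre.length : Int) ((pre ++ srow :: suf).length : Int)
      (by exact_mod_cast Nat.zero_le _) (by simp; positivity),
    PySem.List.pyRange_one_cons
      (show (pre.length : Int) < ((pre ++ srow :: suf).length : Int) by simp),
    List.foldl_append, List.foldl_cons]
  have hc1 : ∀ (acc : Int × Int), ∀ x ∈ PySem.List.pyRange 0 (pre.length : Int),
      (fun (st : Int × Int) r =>
        match (PySem.List.pyRange 0
            ((PySem.List.pyGetD (pre ++ srow :: suf) 0 "").toList.length)).find?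
            (fun c => cellA (pre ++ srow :: suf) r c == 'S') with
        | some c => (r, c)
        | none => st) acc x = acc := by
    intro acc x hx
    obtain ⟨hx0, hxk⟩ := PySem.List.mem_pyRange_one.mp hx
    have hxl : x.toNat < pre.length := by omega
    have hget : PySem.List.pyGetD (pre ++ srow :: suf) x "" = pre[x.toNat] := by
      rw [PySem.List.pyGetD_eq_getElem _ "" hx0 (by simp; omega)]
      exact List.getElem_append_left hxl
    simp only []
    rw [inner_none _ x hx0
      (by rw [hget]; exact noS_of_isIn_false _ (hpre _ (List.getElem_mem _)))]
  rw [PySem.List.foldl_congr_mem _ _ _ _ hc1, PySem.List.foldl_ignore]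
  have hmid := inner_some (pre ++ srow :: suf) (pre.length : Int)
      (by exact_mod_cast Nat.zero_le _) c hcW (by rw [hgetk]; exact hF)
  rw [hmid]
  have hc2 : ∀ (acc : Int × Int), ∀ x ∈ PySem.List.pyRange ((pre.length : Int) + 1)
      ((pre ++ srow :: suf).length : Int),
      (fun (st : Int × Int) r =>
        match (PySem.List.pyRange 0
            ((PySem.List.pyGetD (pre ++ srow :: suf) 0 "").toList.length)).find?
            (fun c => cellA (pre ++ srow :: suf) r c == 'S') with
        | some c => (r, c)
        | none => st) acc x = acc := by
    intro acc x hx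
    obtain ⟨hx0, hxR⟩ := PySem.List.mem_pyRange_one.mp hx
    have hx1 : pre.length < x.toNat := by omega
    have hxR' : x.toNat < (pre ++ srow :: suf).length := by omega
    have hsl : x.toNat - pre.length - 1 < suf.length := by simp at hxR'; omega
    have hget : PySem.List.pyGetD (pre ++ srow :: suf) x "" =
        suf[x.toNat - pre.length - 1] := by
      rw [PySem.List.pyGetD_eq_getElem _ "" (by omega) (by omega)]
      rw [List.getElem_append_right (by omega)]
      obtain ⟨m, hm⟩ : ∃ m, x.toNat - pre.length = m + 1 :=
        ⟨x.toNat - pre.length - 1, by omega⟩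
      simp only [hm, List.getElem_cons_succ, Nat.add_sub_cancel]
    simp only []
    rw [inner_none _ x (by omega)
      (by rw [hget]; exact noS_of_isIn_false _ (hsuf _ (List.getElem_mem _)))]
  rw [PySem.List.foldl_congr_mem _ _ _ _ hc2, PySem.List.foldl_ignore]

theorem scanA_noS (park : List String)
    (hall : ∀ y ∈ park, PySem.Str.isIn "S" y = false) :
    scanA park park.length ((PySem.List.pyGetD park 0 "").toList.length) = (0, 0) := by
  unfold scanA
  have hc : ∀ (acc : Int × Int), ∀ x ∈ PySem.List.pyRange 0 (park.length : Int),
      (fun (st : Int × Int) r =>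
        match (PySem.List.pyRange 0
            ((PySem.List.pyGetD park 0 "").toList.length)).find?
            (fun c => cellA park r c == 'S') with
        | some c => (r, c)
        | none => st) acc x = acc := by
    intro acc x hx
    obtain ⟨hx0, hxR⟩ := PySem.List.mem_pyRange_one.mp hx
    have hmem : PySem.List.pyGetD park x "" ∈ park :=
      PySem.List.pyGetD_mem park "" (by unfold PySem.Raise.InRange; omega)
    simp only []
    rw [inner_none park x hx0 (noS_of_isIn_false _ (hall _ hmem))]
  rw [PySem.List.foldl_congr_mem _ _ _ _ hc, PySem.List.foldl_ignore]

theorem enumerate_snd_mem {α : Type} (l : List α) (st : Int) (p : Int × α)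
    (hp : p ∈ PySem.List.enumerate l st) : p.2 ∈ l := by
  induction l generalizing st with
  | nil => simp [PySem.List.enumerate_nil] at hp
  | cons x t ih =>
    rw [PySem.List.enumerate_cons] at hp
    rcases List.mem_cons.mp hp with rfl | hp
    · simp
    · exact List.mem_cons_of_mem _ (ih (st + 1) hp)

-- ===== VERDICT (by name: the statement is the Claim_ definition above) =====
theorem solution_spec : Claim_equal_solution := by
  unfold Claim_equal_solution
  intro park routes _ hpre
  unfold Spec_solution
  obtain ⟨hne, hcols0, hwide, hSgrid, hScount, hroutes⟩ := hpre
  have hrows : 0 < park.length := by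
    cases park with
    | nil => exact absurd rfl hne
    | cons a t => simp
  have hcols : 0 < (PySem.List.pyGetD park 0 "").toList.length := by
    cases hcl : (PySem.List.pyGetD park 0 "").toList with
    | nil => exact absurd hcl hcols0
    | cons a t => simp
  rcases Nat.le_one_iff_eq_zero_or_eq_one.mp hScount with h0 | h1
  · have hnoS : ∀ y ∈ park, PySem.Str.isIn "S" y = false := by
      intro y hy
      simpa using List.countP_eq_zero.mp h0 y hy
    have hscan := scanA_noS park hnoS
    have hfindB : (PySem.List.enumerate park).find?
        (fun p => PySem.Str.isIn "S" p.2) = none := by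
      apply List.find?_eq_none.mpr
      intro x hx
      rw [hnoS x.2 (enumerate_snd_mem park 0 x hx)]
      simp
    have hInv0 : InvP park ((0 : Int), (0 : Int)) :=
      ⟨le_refl 0, by show (0 : Int) < (park.length : Int); exact_mod_cast hrows,
        le_refl 0, by
          show (0 : Int) < (((PySem.List.pyGetD park 0 "").toList.length : Nat) : Int)
          exact_mod_cast hcols⟩
    have hfold := fold_eq park hwide routes hroutes (0, 0) hInv0
    simp only [solution, solution_alt]
    rw [hscan, hfindB, hfold]
  · obtain ⟨pre, srow, suf, hpark, hx, hpreNoS, hsufNoS⟩ :=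
      countP_one_decomp (fun s => PySem.Str.isIn "S" s) park h1
    subst hpark
    have hmemS : 'S' ∈ srow.toList := by
      have hinf := (PySem.Str.isIn_iff_infix "S" srow).mp hx
      rw [show ("S" : String).toList = ['S'] from by decide] at hinf
      exact (List.singleton_infix_iff _ _).mp hinf
    obtain ⟨c, hF⟩ := firstS_exists _ hmemS
    have hcS : srow.toList[c]'hF.1 = 'S' := by
      rw [← List.getD_eq_getElem srow.toList ' ' hF.1]; exact hF.2.1
    have hcW : c < (PySem.List.pyGetD (pre ++ srow :: suf) 0 "").toList.length := by
      by_contra hge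
      rw [Nat.not_lt] at hge
      have hmem : 'S' ∈ srow.toList.drop
          ((PySem.List.pyGetD (pre ++ srow :: suf) 0 "").toList.length) := by
        refine List.mem_iff_getElem.mpr
          ⟨c - (PySem.List.pyGetD (pre ++ srow :: suf) 0 "").toList.length, ?_, ?_⟩
        · have hclen := hF.1
          simp only [List.length_drop]
          omega
        · rw [List.getElem_drop]
          have hidx : (PySem.List.pyGetD (pre ++ srow :: suf) 0 "").toList.length +
              (c - (PySem.List.pyGetD (pre ++ srow :: suf) 0 "").toList.length) = c := by
            omega
          simp only [hidx]
          exact hcS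
      exact absurd hmem (hSgrid srow (by simp))
    have hscan := scanA_eq pre srow suf hpreNoS hsufNoS c hF (by exact_mod_cast hcW)
    have hfindB := find?_enumerate pre srow suf 0 hpreNoS hx
    have hInv0 : InvP (pre ++ srow :: suf)
        (((pre.length : Nat) : Int), ((c : Nat) : Int)) := by
      refine ⟨by simp, by simp, by simp, ?_⟩
      show ((c : Nat) : Int) < (((PySem.List.pyGetD (pre ++ srow :: suf) 0 "").toList.length : Nat) : Int)
      exact_mod_cast hcW
    have hfold := fold_eq (pre ++ srow :: suf) hwide routes hroutes
      (((pre.length : Nat) : Int), ((c : Nat) : Int)) hInv0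
    simp only [solution, solution_alt]
    rw [hscan, hfindB]
    simp only [zero_add]
    rw [PySem.Str.find_eq, show ("S" : String).toList = ['S'] from by decide,
      chars_find_firstS srow.toList c hF]
    rw [hfold]
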